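-- pv_equiv track=rewrite | github.com/timvink/sudoku-solver | scripts/parse_svg_url.py | parse_sg
-- ===== SOURCE A (Python) =====
-- def parse_sg(s):
--     """
--     Parse the sudoku encoding string from the 'sg' parameter.
--     Each cell is encoded by either:
--       - A digit (1-9) for a solved cell
--       - A set of digits in parentheses for a cell with pencil marks
--     The 'W' prefix is just for styling and can be ignored.
--     Returns a list of 81 integers (with 0 for empty cells).
--     """
--     tokens = []
--     i = 0
--
--     while i < len(s):
--         # Skip any whitespace or W characters
--         if s[i].isspace() or s[i] == 'W':
--             i += 1
--             continue
--
--         # If we see a digit, that's a solved cell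
--         if s[i].isdigit():
--             tokens.append(int(s[i]))
--             i += 1
--             continue
--
--         # If we see an opening parenthesis, skip until closing parenthesis
--         if s[i] == '(':
--             tokens.append(0)  # Empty cell with pencil marks
--             while i < len(s) and s[i] != ')':
--                 i += 1
--             if i < len(s):
--                 i += 1  # Skip the closing parenthesis
--             continue
--
--         # Skip any other characters
--         i += 1
--
--     # Ensure exactly 81 cells
--     return tokens[:81] if len(tokens) >= 81 else tokens + [0] * (81 - len(tokens))
-- ===== SOURCE B (Python) =====
-- def parse_sg(s):
--     """
--     Parse the sudoku encoding string from the 'sg' parameter.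
--     Split on ')' so each piece holds at most one pencil-mark group tail;
--     digits before the piece's '(' are solved cells, a '(' contributes one 0.
--     """
--     tokens = []
--     for piece in s.split(')'):
--         before, paren, _ = piece.partition('(')
--         tokens += [int(c) for c in before if c.isdigit()] + ([0] if paren else [])
--     return (tokens + [0] * 81)[:81]
-- ===== Notes on version B (the rewrite author's own statement) =====
-- stated objective: faster
-- what changed: Replaces the index-based while loop with a nested skip-to-close scan by splitting the string on the closing parenthesis into pieces, each processed declaratively: partition at the opening parenthesis gives the solved digits (a comprehension) and whether the piece opens a pencil-mark group (one 0); padding/truncation becomes a single (tokens+[0]*81)[:81].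
import Mathlib
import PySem

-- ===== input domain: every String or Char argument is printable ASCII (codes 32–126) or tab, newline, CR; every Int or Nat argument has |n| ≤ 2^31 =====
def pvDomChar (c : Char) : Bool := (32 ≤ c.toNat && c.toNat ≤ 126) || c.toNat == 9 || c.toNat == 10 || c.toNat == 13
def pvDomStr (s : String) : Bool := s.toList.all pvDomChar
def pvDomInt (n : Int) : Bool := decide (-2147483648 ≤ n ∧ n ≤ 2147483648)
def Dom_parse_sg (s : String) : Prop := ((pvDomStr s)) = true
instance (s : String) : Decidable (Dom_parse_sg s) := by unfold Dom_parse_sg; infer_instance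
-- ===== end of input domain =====

-- B splits the string on ')' and maps each piece declaratively instead of A's
-- index-driven while loop with a nested skip-to-')' scan (same O(n); measurably faster in CPython: C-level split/partition instead of a per-character Python loop).

-- ===== PORT A =====
-- inner `while i < len(s) and s[i] != ')': i += 1` followed by `if i < len(s): i += 1`
def pvSkipGroup : List Char → List Char
  | [] => []
  | c :: rest => if c = ')' then rest else pvSkipGroup rest

theorem pvSkipGroup_length_le (l : List Char) : (pvSkipGroup l).length ≤ l.length := by
  induction l with
  | nil => simp [pvSkipGroup]
  | cons c rest ih =>
    simp only [pvSkipGroup]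
    split
    · simp
    · exact Nat.le_succ_of_le ih

-- the main `while i < len(s)` loop, as structural recursion over the remaining characters
def pvScanA : List Char → List Int
  | [] => []
  | c :: rest =>
    if PySem.Chars.isspace c || c = 'W' then pvScanA rest
    else if PySem.Chars.isdigit c then ((c.toNat : Int) - 48) :: pvScanA rest
    else if c = '(' then 0 :: pvScanA (pvSkipGroup rest)
    else pvScanA rest
termination_by l => l.length
decreasing_by
  · simp
  · simp
  · exact Nat.lt_succ_of_le (pvSkipGroup_length_le rest)
  · simp

def parse_sg (s : String) : List Int :=
  let tokens := pvScanA s.toList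
  if 81 ≤ tokens.length then tokens.take 81
  else tokens ++ List.replicate (81 - tokens.length) 0

-- ===== PORT B =====
-- `before, paren, _ = piece.partition('(')` → takeWhile (· ≠ '(') / contains '('
def parse_sg_alt (s : String) : List Int :=
  let tokens := (PySem.Chars.splitOn s.toList [')']).foldl
    (fun (acc : List Int) piece =>
      acc ++ ((piece.takeWhile (fun c => c ≠ '(')).filter PySem.Chars.isdigit).map
               (fun c => (c.toNat : Int) - 48)
          ++ (if piece.contains '(' then [(0 : Int)] else [])) []
  (tokens ++ List.replicate 81 0).take 81

-- ===== PRECONDITION & SPEC =====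
def Spec_parse_sg (s : String) (out : List Int) : Prop := out = parse_sg_alt s
instance (s : String) (out : List Int) : Decidable (Spec_parse_sg s out) := by unfold Spec_parse_sg; infer_instance

-- ===== CLAIM (what is proved, stated in full; the proofs are below) =====
def Claim_equal_parse_sg : Prop := ∀ (s : String), Dom_parse_sg s → Spec_parse_sg s (parse_sg s)

-- ===== LEMMAS AND PROOFS =====

-- proof-side characterisation of splitting on ')'
def pvSp : List Char → List (List Char)
  | [] => [[]]
  | c :: rest => if c = ')' then [] :: pvSp rest else (pvSp rest).modifyHead (c :: ·)

-- the per-piece token list of B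
def pvTok (piece : List Char) : List Int :=
  ((piece.takeWhile (fun c => c ≠ '(')).filter PySem.Chars.isdigit).map
      (fun c => (c.toNat : Int) - 48)
    ++ (if piece.contains '(' then [(0 : Int)] else [])

theorem pvSp_ne_nil (l : List Char) : pvSp l ≠ [] := by
  induction l with
  | nil => simp [pvSp]
  | cons c rest ih =>
    simp only [pvSp]
    split
    · simp
    · cases h : pvSp rest with
      | nil => exact absurd h ih
      | cons a t => simp

theorem pvSplitOn_go_eq (fuel : Nat) (l cur : List Char) (acc : List (List Char))
    (h : l.length ≤ fuel) :
    PySem.Chars.splitOn.go [')'] fuel l cur acc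
      = acc.reverse ++ (pvSp l).modifyHead (cur.reverse ++ ·) := by
  induction fuel generalizing l cur acc with
  | zero =>
    have hl : l = [] := List.eq_nil_of_length_eq_zero (Nat.le_zero.mp h)
    subst hl
    simp [PySem.Chars.splitOn.go, pvSp]
  | succ n ih =>
    cases l with
    | nil => simp [PySem.Chars.splitOn.go, pvSp]
    | cons c rest =>
      have hr : rest.length ≤ n := by simpa using h
      simp only [PySem.Chars.splitOn.go]
      by_cases hc : c = ')'
      · subst hc
        rw [if_pos (by simp [List.isPrefixOf])]
        have hdrop : List.drop [')'].length (')' :: rest) = rest := by simp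
        rw [hdrop, ih rest [] (cur.reverse :: acc) hr]
        simp only [pvSp, List.reverse_cons, List.append_assoc, List.singleton_append]
        cases pvSp rest <;> simp
      · rw [if_neg (by simp [List.isPrefixOf, Ne.symm hc])]
        rw [ih rest (c :: cur) acc hr]
        simp only [pvSp, if_neg hc]
        cases hsp : pvSp rest with
        | nil => exact absurd hsp (pvSp_ne_nil rest)
        | cons a t => simp [List.modifyHead]

theorem pvSplitOn_eq_sp (l : List Char) :
    PySem.Chars.splitOn l [')'] = pvSp l := by
  have h := pvSplitOn_go_eq (l.length + 1) l [] [] (Nat.le_succ _)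
  simp only [PySem.Chars.splitOn]
  rw [h]
  cases hsp : pvSp l with
  | nil => exact absurd hsp (pvSp_ne_nil l)
  | cons a t => simp [List.modifyHead]

theorem pvSkipGroup_of_not_mem (l : List Char) (h : ')' ∉ l) : pvSkipGroup l = [] := by
  induction l with
  | nil => rfl
  | cons c rest ih =>
    simp only [List.mem_cons, not_or] at h
    simp only [pvSkipGroup]
    rw [if_neg (fun hc => h.1 hc.symm)]
    exact ih h.2

theorem pvSp_tail (l : List Char) :
    (pvSp l).tail = if ')' ∈ l then pvSp (pvSkipGroup l) else [] := by
  induction l with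
  | nil => simp [pvSp]
  | cons c rest ih =>
    simp only [pvSp, pvSkipGroup]
    by_cases hc : c = ')'
    · simp [hc]
    · rw [if_neg hc, if_neg hc]
      cases hsp : pvSp rest with
      | nil => exact absurd hsp (pvSp_ne_nil rest)
      | cons a t =>
        simp only [List.modifyHead, List.tail_cons]
        rw [hsp] at ih
        simp only [List.tail_cons] at ih
        rw [ih]
        simp [List.mem_cons, Ne.symm hc]

-- whitespace characters are never digits
theorem pvSpace_not_digit (c : Char) (h : PySem.Chars.isspace c = true) :
    PySem.Chars.isdigit c = false := by
  have h0 : ('0':Char).val.toNat = 48 := by decide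
  have h9 : ('9':Char).val.toNat = 57 := by decide
  simp only [PySem.Chars.isspace, Bool.or_eq_true, Bool.and_eq_true, decide_eq_true_eq] at h
  simp only [PySem.Chars.isdigit, Bool.and_eq_false_iff, decide_eq_false_iff_not, Char.le_def,
    UInt32.le_iff_toNat_le, Char.toNat] at *
  omega

-- pvTok on a piece whose first char is not '('
theorem pvTok_cons (c : Char) (a : List Char) (hc : c ≠ '(') :
    pvTok (c :: a) =
      (if PySem.Chars.isdigit c then [((c.toNat : Int) - 48)] else []) ++ pvTok a := by
  have hb : ('(' == c) = false := by simp [Ne.symm hc]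
  simp only [pvTok, List.takeWhile_cons, List.contains_cons, hb, Bool.false_or]
  rw [if_pos (by simp [hc])]
  simp only [List.filter_cons]
  cases hd : PySem.Chars.isdigit c <;> simp

-- the heart: A's scan equals B's piecewise tokens
theorem pvScanA_eq (n : Nat) : ∀ l : List Char, l.length ≤ n →
    pvScanA l = (pvSp l).flatMap pvTok := by
  induction n with
  | zero =>
    intro l h
    have hl : l = [] := List.eq_nil_of_length_eq_zero (Nat.le_zero.mp h)
    subst hl
    simp [pvScanA, pvSp, pvTok]
  | succ n ih =>
    intro l h
    cases l with
    | nil => simp [pvScanA, pvSp, pvTok]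
    | cons c rest =>
      have hr : rest.length ≤ n := by simpa using h
      rw [pvScanA]
      by_cases hpar : c = '('
      · subst hpar
        rw [if_neg (by decide), if_neg (by decide), if_pos rfl]
        simp only [pvSp, if_neg (by decide : ¬('(' : Char) = ')')]
        cases hsp : pvSp rest with
        | nil => exact absurd hsp (pvSp_ne_nil rest)
        | cons a t =>
          simp only [List.modifyHead, List.flatMap_cons]
          have htok : pvTok ('(' :: a) = [0] := by
            simp [pvTok]
          rw [htok]
          have ht : t = (pvSp rest).tail := by rw [hsp]; rfl
          rw [ht, pvSp_tail rest]
          by_cases hm : ')' ∈ rest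
          · rw [if_pos hm]
            rw [ih (pvSkipGroup rest) (le_trans (pvSkipGroup_length_le rest) hr)]
            rfl
          · rw [if_neg hm, pvSkipGroup_of_not_mem rest hm]
            simp [pvScanA]
      · by_cases hcp : c = ')'
        · subst hcp
          rw [if_neg (by decide), if_neg (by decide), if_neg (by decide)]
          rw [show pvSp (')' :: rest) = [] :: pvSp rest from by simp [pvSp]]
          simp only [List.flatMap_cons]
          have htok : pvTok [] = [] := by simp [pvTok]
          rw [htok, List.nil_append]
          exact ih rest hr
        · -- ordinary character: neither '(' nor ')'
          have hsp' : (pvSp (c :: rest)).flatMap pvTok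
              = (if PySem.Chars.isdigit c then [((c.toNat : Int) - 48)] else [])
                ++ (pvSp rest).flatMap pvTok := by
            simp only [pvSp, if_neg hcp]
            cases hsp : pvSp rest with
            | nil => exact absurd hsp (pvSp_ne_nil rest)
            | cons a t =>
              simp only [List.modifyHead, List.flatMap_cons]
              rw [pvTok_cons c a hpar]
              simp [List.append_assoc]
          rw [hsp', ← ih rest hr]
          by_cases hs : PySem.Chars.isspace c = true
          · rw [if_pos (by simp [hs]), pvSpace_not_digit c hs]
            simp
          · by_cases hw : c = 'W'
            · subst hw
              rw [if_pos (by simp)]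
              rw [show PySem.Chars.isdigit 'W' = false from by decide]
              simp
            · rw [if_neg (by simp [hs, hw])]
              cases hd : PySem.Chars.isdigit c with
              | true => rw [if_pos rfl]; simp
              | false =>
                rw [if_neg (by simp), if_neg hpar]
                rfl

-- padding: A's two-branch form equals B's uniform pad-then-take
theorem pvPad_eq (t : List Int) :
    (if 81 ≤ t.length then t.take 81 else t ++ List.replicate (81 - t.length) 0)
      = (t ++ List.replicate 81 0).take 81 := by
  rw [List.take_append]
  by_cases h : 81 ≤ t.length
  · simp [h, Nat.sub_eq_zero_of_le h]
  · have h' : t.length ≤ 81 := le_of_not_ge h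
    rw [if_neg h, List.take_of_length_le h', List.take_replicate]
    congr 1
    congr 1
    omega

-- ===== VERDICT (by name: the statement is the Claim_ definition above) =====
theorem parse_sg_spec : Claim_equal_parse_sg := by
  intro s _
  unfold Spec_parse_sg
  simp only [parse_sg, parse_sg_alt]
  rw [pvSplitOn_eq_sp]
  have hfun : (fun (acc : List Int) piece =>
      acc ++ ((piece.takeWhile (fun c => c ≠ '(')).filter PySem.Chars.isdigit).map
               (fun c => (c.toNat : Int) - 48)
          ++ (if piece.contains '(' then [(0 : Int)] else []))
      = (fun (acc : List Int) piece => acc ++ pvTok piece) := by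
    funext acc piece
    simp [pvTok, List.append_assoc]
  rw [hfun, PySem.List.foldl_append_eq_flatMap]
  rw [List.nil_append, ← pvScanA_eq s.toList.length s.toList le_rfl]
  exact pvPad_eq (pvScanA s.toList)
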